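-- pv_equiv track=rewrite | github.com/MherBaghinyan/python_differential | project_files/cooperative.py | get_matrix_b
-- ===== SOURCE A (Python) =====
-- def get_matrix_b(matrix_a):
--     rows = len(matrix_a)
--     columns = len(matrix_a[0])
--     b_matrix = [[0] * columns for x in range(rows)]
--     for i in range(0, rows):
--         for j in range(0, columns):
--             item = matrix_a[i][j]
--             if i == j:
--                 b_matrix[i][j] = item
--             else:
--                 b_matrix[i][j] = -item
--     return b_matrix
-- ===== SOURCE B (Python) =====
-- def get_matrix_b(matrix_a):
--     columns = len(matrix_a[0])
--
--     def neg_except(row, k):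
--         # negate every element of row except the one at position k
--         if not row:
--             return []
--         if k == 0:
--             return [row[0]] + [-x for x in row[1:]]
--         return [-row[0]] + neg_except(row[1:], k - 1)
--
--     return [neg_except(row[:columns], i) for i, row in enumerate(matrix_a)]
-- ===== Notes on version B (the rewrite author's own statement) =====
-- stated objective: alternative
-- what changed: Replaces the index-based double loop with a branch per cell by structural recursion on each row: a recursive helper peels elements off the row while decrementing a diagonal counter, keeping the element when the counter hits zero and negating the rest; rows are pre-truncated to len(matrix_a[0]) by slicing.
import Mathlib
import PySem

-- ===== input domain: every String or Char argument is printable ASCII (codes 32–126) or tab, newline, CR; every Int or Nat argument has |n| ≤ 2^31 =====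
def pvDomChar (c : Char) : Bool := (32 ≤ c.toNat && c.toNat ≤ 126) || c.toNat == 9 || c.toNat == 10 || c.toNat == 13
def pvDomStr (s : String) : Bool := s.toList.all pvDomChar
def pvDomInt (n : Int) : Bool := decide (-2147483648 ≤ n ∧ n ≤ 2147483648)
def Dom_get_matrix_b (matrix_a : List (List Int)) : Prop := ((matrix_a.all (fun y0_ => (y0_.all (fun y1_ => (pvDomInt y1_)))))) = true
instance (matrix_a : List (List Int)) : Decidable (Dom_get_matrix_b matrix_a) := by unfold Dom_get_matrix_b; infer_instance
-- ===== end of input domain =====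

-- B replaces the index-based double loop (branch per cell) with structural recursion on each
-- row: a helper peels elements while decrementing a diagonal counter; rows are pre-truncated
-- by slicing. Same asymptotic cost (objective: alternative decomposition).

-- ===== PORT A =====
-- matrix_a[i][j] is read via pyGetD with default values; the defaults are never
-- reached inside Pre_get_matrix_b (which excludes the inputs where Python raises IndexError).
def get_matrix_b (matrix_a : List (List Int)) : List (List Int) :=
  let rows : Int := matrix_a.length
  let columns : Int := (PySem.List.pyGetD matrix_a 0 []).length
  let b_matrix : List (List Int) :=
    List.replicate rows.toNat (List.replicate columns.toNat (0 : Int))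
  (PySem.List.pyRange 0 rows 1).foldl (fun b i =>
    (PySem.List.pyRange 0 columns 1).foldl (fun b j =>
      let item := PySem.List.pyGetD (PySem.List.pyGetD matrix_a i []) j 0
      if i = j then
        b.set i.toNat ((PySem.List.pyGetD b i []).set j.toNat item)
      else
        b.set i.toNat ((PySem.List.pyGetD b i []).set j.toNat (-item))) b) b_matrix

-- ===== PORT B =====
-- helper neg_except of Source B: structural recursion on the row, counter k tracks the diagonal
def negExcept (row : List Int) (k : Int) : List Int :=
  match row with
  | [] => []
  | x :: rest => if k = 0 then x :: rest.map (fun y => -y) else (-x) :: negExcept rest (k - 1)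

def get_matrix_b_alt (matrix_a : List (List Int)) : List (List Int) :=
  let columns : Int := (PySem.List.pyGetD matrix_a 0 []).length
  (PySem.List.enumerate matrix_a).map (fun p =>
    negExcept (PySem.List.slice p.2 none (some columns)) p.1)

-- ===== PRECONDITION & SPEC =====
-- Pre_ excludes exactly the inputs where the Python A raises IndexError:
-- the empty matrix (matrix_a[0]) and ragged matrices with a row shorter than row 0.
def Pre_get_matrix_b (matrix_a : List (List Int)) : Prop :=
  matrix_a ≠ [] ∧ ∀ row ∈ matrix_a, (matrix_a.headD []).length ≤ row.length
instance (matrix_a : List (List Int)) : Decidable (Pre_get_matrix_b matrix_a) := by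
  unfold Pre_get_matrix_b; infer_instance
def pvWitness_get_matrix_b : List (List Int) := [[1, 2], [3, 4]]

def Spec_get_matrix_b (matrix_a : List (List Int)) (out : List (List Int)) : Prop := out = get_matrix_b_alt matrix_a
instance (matrix_a : List (List Int)) (out : List (List Int)) : Decidable (Spec_get_matrix_b matrix_a out) := by unfold Spec_get_matrix_b; infer_instance

-- ===== CLAIM (what is proved, stated in full; the proofs are below) =====
def Claim_equal_get_matrix_b : Prop := ∀ (matrix_a : List (List Int)), Dom_get_matrix_b matrix_a → Pre_get_matrix_b matrix_a → Spec_get_matrix_b matrix_a (get_matrix_b matrix_a)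
-- ===== LEMMAS AND PROOFS =====

-- the entry both programs read at (k, l), and the common target matrix
def pvA (ma : List (List Int)) (k l : Nat) : Int := (ma.getD k []).getD l 0
def pvGA (ma : List (List Int)) (k l : Nat) : Int :=
  if k = l then pvA ma k l else -(pvA ma k l)
def pvT (ma : List (List Int)) (n m : Nat) : List (List Int) :=
  (List.range n).map (fun k => (List.range m).map (pvGA ma k))

-- inner row fill: setting indices 0..m-1 one by one
theorem pv_rowfill (g : Nat → Int) :
    ∀ (m : Nat) (row : List Int), m ≤ row.length →
    (List.range m).foldl (fun r k => r.set k (g k)) row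
      = (List.range m).map g ++ row.drop m := by
  intro m
  induction m with
  | zero => simp
  | succ m ih =>
    intro row hm
    rw [List.range_succ, List.foldl_append, List.foldl_cons, List.foldl_nil,
      ih row (by omega)]
    rw [List.map_append]
    rw [List.set_append_right _ _ (by simp)]
    rw [show List.drop m row = row[m] :: List.drop (m+1) row from
      List.drop_eq_getElem_cons (by omega)]
    simp only [List.length_map, List.length_range, Nat.sub_self]
    rw [List.set_cons_zero]
    simp

-- a fold that only rewrites entries of row i rewrites row i by the folded row update
theorem pv_matrix_inner (g : Nat → Int) (i : Nat) :
    ∀ (js : List Nat) (b : List (List Int)), i < b.length →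
    js.foldl (fun b j => b.set i ((b.getD i []).set j (g j))) b
      = b.set i (js.foldl (fun r j => r.set j (g j)) (b.getD i [])) := by
  intro js
  induction js with
  | nil =>
    intro b hb
    rw [List.foldl_nil, List.foldl_nil, List.getD_eq_getElem _ _ hb, List.set_getElem_self]
  | cons j js ih =>
    intro b hb
    rw [List.foldl_cons, List.foldl_cons]
    rw [ih _ (by simpa using hb)]
    rw [List.set_set]
    congr 1
    rw [List.getD_eq_getElem _ _ (by simpa using hb), List.getElem_set_self,
      List.getD_eq_getElem _ _ hb]

theorem pv_set_take_drop {α : Type} (A B : List α) (r : Nat) (x : α)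
    (hr : r < A.length) (hx : A[r] = x) (hlen : A.length = B.length) :
    (A.take r ++ B.drop r).set r x = A.take (r + 1) ++ B.drop (r + 1) := by
  rw [List.set_append_right _ _ (by rw [List.length_take]; omega)]
  rw [List.length_take, min_eq_left (by omega), Nat.sub_self]
  rw [show B.drop r = B[r]'(by omega) :: B.drop (r+1) from List.drop_eq_getElem_cons (by omega)]
  rw [List.set_cons_zero, List.take_add_one, List.getElem?_eq_getElem hr, hx]
  simp

theorem pv_get_take_drop {α : Type} [Inhabited α] (A B : List α) (r : Nat) (d : α)
    (hA : r ≤ A.length) (hB : r < B.length) :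
    (A.take r ++ B.drop r).getD r d = B[r] := by
  rw [List.getD_eq_getElem _ _ (by simp [List.length_take, List.length_drop]; omega)]
  rw [List.getElem_append_right (by simp [List.length_take])]
  simp [List.length_take, min_eq_left hA]

-- A's outer loop: after r rows, the first r rows are filled and the rest are still zero rows
theorem pvA_outer (ma : List (List Int)) (n m : Nat) :
    ∀ r ≤ n, (List.range r).foldl (fun b k =>
        (List.range m).foldl (fun b l => b.set k ((b.getD k []).set l (pvGA ma k l))) b)
      (List.replicate n (List.replicate m (0 : Int)))
      = (pvT ma n m).take r ++ (List.replicate n (List.replicate m (0 : Int))).drop r := by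
  intro r
  induction r with
  | zero => intro _; simp
  | succ r ih =>
    intro hr
    rw [List.range_succ, List.foldl_append, List.foldl_cons, List.foldl_nil, ih (by omega)]
    have hTlen : (pvT ma n m).length = n := by simp [pvT]
    have hBlen : ((pvT ma n m).take r ++
        (List.replicate n (List.replicate m (0 : Int))).drop r).length = n := by
      simp [List.length_take, hTlen]
      omega
    rw [pv_matrix_inner (pvGA ma r) r _ _ (by omega)]
    rw [pv_get_take_drop _ _ _ _ (by omega) (by simp; omega)]
    rw [List.getElem_replicate]
    rw [pv_rowfill (pvGA ma r) m _ (by simp)]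
    rw [show (List.replicate m (0:Int)).drop m = [] by simp, List.append_nil]
    have hTr : (pvT ma n m)[r]'(by omega) = (List.range m).map (pvGA ma r) := by simp [pvT]
    rw [pv_set_take_drop _ _ _ _ (by omega) hTr (by simp [hTlen])]

-- characterization of port A
theorem pvA_char (ma : List (List Int)) :
    get_matrix_b ma = pvT ma ma.length (PySem.List.pyGetD ma 0 []).length := by
  unfold get_matrix_b
  simp only [PySem.List.pyRange_zero_nat, List.foldl_map, Int.toNat_natCast,
    PySem.List.pyGetD_natCast, Nat.cast_inj]
  have hf : (fun (b : List (List Int)) (k : Nat) =>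
      (List.range (PySem.List.pyGetD ma 0 []).length).foldl (fun b l =>
        if k = l then b.set k ((b.getD k []).set l ((ma.getD k []).getD l 0))
        else b.set k ((b.getD k []).set l (-((ma.getD k []).getD l 0)))) b)
      = (fun (b : List (List Int)) (k : Nat) =>
      (List.range (PySem.List.pyGetD ma 0 []).length).foldl (fun b l =>
        b.set k ((b.getD k []).set l (pvGA ma k l))) b) := by
    funext b k
    congr 1
    funext b l
    simp only [pvGA, pvA]
    split <;> rfl
  rw [hf]
  rw [pvA_outer ma ma.length (PySem.List.pyGetD ma 0 []).length ma.length le_rfl]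
  rw [List.take_of_length_le (by simp [pvT]), List.drop_of_length_le (by simp)]
  simp

-- a row mapped to its negation, expressed through indices
theorem pv_map_neg (r : List Int) :
    r.map (fun y => -y) = (List.range r.length).map (fun l => -(r.getD l 0)) := by
  apply List.ext_getElem (by simp)
  intro l h1 h2
  simp only [List.getElem_map, List.getElem_range, neg_inj]
  rw [List.getD_eq_getElem r 0 (by simpa using h1)]

-- negExcept on a natural counter, expressed through indices
theorem negExcept_eq (r : List Int) :
    ∀ (k : Nat), negExcept r (k : Int)
      = (List.range r.length).map (fun l => if k = l then r.getD l 0 else -(r.getD l 0)) := by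
  induction r with
  | nil => intro k; simp [negExcept]
  | cons x rest ih =>
    intro k
    rw [List.length_cons, List.range_succ_eq_map, List.map_cons, List.map_map]
    cases k with
    | zero =>
      have h0 : negExcept (x :: rest) ((0 : Nat) : Int) = x :: rest.map (fun y => -y) := by
        simp [negExcept]
      rw [h0]
      congr 1
      rw [pv_map_neg]
      apply List.map_congr_left
      intro l hl
      simp only [Function.comp_def]
      rw [show Nat.succ l = l + 1 from rfl, if_neg (by omega), List.getD_cons_succ,
        List.getD_eq_getElem?_getD]
    | succ k =>
      have h0 : negExcept (x :: rest) ((k + 1 : Nat) : Int) = -x :: negExcept rest (k : Int) := by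
        have hne : ((k + 1 : Nat) : Int) ≠ 0 := by omega
        have hsub : ((k + 1 : Nat) : Int) - 1 = (k : Int) := by omega
        rw [negExcept, if_neg hne, hsub]
      rw [h0, ih k]
      congr 1
      apply List.map_congr_left
      intro l hl
      simp only [Function.comp_def]
      rw [show Nat.succ l = l + 1 from rfl]
      by_cases h : k = l
      · subst h
        rw [if_pos rfl, if_pos rfl, List.getD_cons_succ]
      · rw [if_neg h, if_neg (by omega), List.getD_cons_succ]

-- characterization of port B (uses the precondition: every row at least as long as row 0)
theorem pvB_char (ma : List (List Int))
    (hpre : ∀ row ∈ ma, (ma.headD []).length ≤ row.length) :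
    get_matrix_b_alt ma = pvT ma ma.length (PySem.List.pyGetD ma 0 []).length := by
  unfold get_matrix_b_alt
  set m : Nat := (PySem.List.pyGetD ma 0 []).length with hm
  apply List.ext_getElem (by simp [pvT, PySem.List.length_enumerate])
  intro k h1 h2
  simp only [List.length_map, PySem.List.length_enumerate] at h1
  rw [List.getElem_map, PySem.List.getElem_enumerate]
  have hrowlen : m ≤ ma[k].length := by
    have hhead : ma.headD [] = PySem.List.pyGetD ma 0 [] := by
      cases ma with
      | nil => rfl
      | cons a l => simp [PySem.List.pyGetD, PySem.List.pyGet?, PySem.List.pyIdx?]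
    have := hpre ma[k] (List.getElem_mem h1)
    rw [hhead] at this
    exact this
  rw [show (0 : Int) + (k : Int) = ((k : Nat) : Int) by omega]
  rw [PySem.List.slice_to_natCast]
  rw [negExcept_eq]
  simp only [pvT, List.getElem_map, List.getElem_range]
  rw [List.length_take, min_eq_left hrowlen]
  apply List.map_congr_left
  intro l hl
  simp only [List.mem_range] at hl
  have hget : (ma[k].take m).getD l 0 = pvA ma k l := by
    rw [List.getD_eq_getElem _ _ (by rw [List.length_take]; omega),
      List.getElem_take, pvA, List.getD_eq_getElem _ _ h1,
      List.getD_eq_getElem _ _ (by omega)]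
  rw [hget, pvGA]

-- ===== VERDICT (by name: the statement is the Claim_ definition above) =====
theorem get_matrix_b_spec : Claim_equal_get_matrix_b := by
  intro ma _ hpre
  unfold Spec_get_matrix_b
  rw [pvA_char, pvB_char ma hpre.2]
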